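-- pv_equiv track=rewrite | github.com/moosefs/moosefs | mfsscripts/common/utils.py | uniqmask_to_str
-- ===== SOURCE A (Python) =====
-- UNIQ_MASK_IP = 1 << (1+ord('Z')-ord('A'))
--
-- UNIQ_MASK_RACK = 1 << (2+ord('Z')-ord('A'))
--
-- def uniqmask_to_str(uniqmask):
-- 	if uniqmask==0:
-- 		return "-"
-- 	if uniqmask & UNIQ_MASK_IP:
-- 		return "[IP]"
-- 	if uniqmask & UNIQ_MASK_RACK:
-- 		return "[RACK]"
-- 	rstr = ""
-- 	inrange = 0
-- 	for i in range(26):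
-- 		if uniqmask & (1<<i):
-- 			if inrange==0:
-- 				rstr += chr(ord('A')+i)
-- 				if i<24 and ((uniqmask>>i)&7)==7:
-- 					inrange = 1
-- 		else:
-- 			if inrange==1:
-- 				rstr += '-'
-- 				rstr += chr(ord('A')+(i-1))
-- 				inrange = 0
-- 	if inrange:
-- 		rstr += '-'
-- 		rstr += chr(ord('A')+25)
-- 	return rstr
-- ===== SOURCE B (Python) =====
-- UNIQ_MASK_IP = 1 << (1+ord('Z')-ord('A'))
--
-- UNIQ_MASK_RACK = 1 << (2+ord('Z')-ord('A'))
--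
-- def uniqmask_to_str(uniqmask):
-- 	if uniqmask==0:
-- 		return "-"
-- 	if uniqmask & UNIQ_MASK_IP:
-- 		return "[IP]"
-- 	if uniqmask & UNIQ_MASK_RACK:
-- 		return "[RACK]"
-- 	bits = [i for i in range(26) if (uniqmask>>i) & 1]
-- 	parts = []
-- 	k = 0
-- 	while k < len(bits):
-- 		j = k
-- 		while j+1 < len(bits) and bits[j+1] == bits[j]+1:
-- 			j += 1
-- 		s, e = bits[k], bits[j]
-- 		if e - s >= 2:
-- 			parts.append(chr(ord('A')+s) + '-' + chr(ord('A')+e))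
-- 		else:
-- 			parts.extend(chr(ord('A')+i) for i in range(s, e+1))
-- 		k = j + 1
-- 	return ''.join(parts)
-- ===== Notes on version B (the rewrite author's own statement) =====
-- stated objective: alternative
-- what changed: A's single pass over all bit positions carrying an 'inrange' state flag is replaced by collecting the set bit indices once and then grouping maximal consecutive runs, compressing sufficiently long runs to a start-dash-end range and emitting individual letters otherwise.
import Mathlib
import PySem

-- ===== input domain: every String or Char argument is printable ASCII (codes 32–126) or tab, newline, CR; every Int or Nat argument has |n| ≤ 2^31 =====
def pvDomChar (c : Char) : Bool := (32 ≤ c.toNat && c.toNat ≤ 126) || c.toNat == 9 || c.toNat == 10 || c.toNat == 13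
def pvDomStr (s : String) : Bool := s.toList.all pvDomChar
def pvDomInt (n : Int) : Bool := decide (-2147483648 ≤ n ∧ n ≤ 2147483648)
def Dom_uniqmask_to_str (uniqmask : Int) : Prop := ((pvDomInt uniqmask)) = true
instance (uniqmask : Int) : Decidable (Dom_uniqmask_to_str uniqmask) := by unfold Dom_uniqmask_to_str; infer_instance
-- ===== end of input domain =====

-- B replaces A's 26-step state machine (inrange flag carried across iterations) by collecting the set
-- bit indices once and grouping maximal consecutive runs (runs of length ≥ 3 compressed to "X-Y");
-- objective: alternative decomposition of the same O(1)-sized task, no speed claim.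

-- ===== PORT A =====
def UNIQ_MASK_IP : Int := 1 <<< (26 : Nat)     -- 1 << (1+ord('Z')-ord('A'))

def UNIQ_MASK_RACK : Int := 1 <<< (27 : Nat)   -- 1 << (2+ord('Z')-ord('A'))

-- one iteration of A's `for i in range(26)` loop; state = (rstr as chars, inrange)
def uniqAStep (uniqmask : Int) (st : List Char × Int) (i : Nat) : List Char × Int :=
  if PySem.Int.band uniqmask (1 <<< i) ≠ 0 then
    if st.2 = 0 then
      let rstr := st.1 ++ [Char.ofNat (65 + i)]
      if i < 24 ∧ PySem.Int.band (uniqmask >>> i) 7 = 7 then (rstr, 1) else (rstr, 0)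
    else st
  else
    if st.2 = 1 then (st.1 ++ ['-', Char.ofNat (65 + (i - 1))], 0) else st

def uniqmask_to_str (uniqmask : Int) : String :=
  if uniqmask = 0 then "-"
  else if PySem.Int.band uniqmask UNIQ_MASK_IP ≠ 0 then "[IP]"
  else if PySem.Int.band uniqmask UNIQ_MASK_RACK ≠ 0 then "[RACK]"
  else
    let st := (List.range 26).foldl (uniqAStep uniqmask) ([], 0)
    if st.2 ≠ 0 then String.ofList (st.1 ++ ['-', Char.ofNat (65 + 25)]) else String.ofList st.1

-- ===== PORT B =====
-- B's inner `while j+1 < len(bits) and bits[j+1] == bits[j]+1` walk: extend the run from e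
def uniqBConsume : Nat → List Nat → Nat × List Nat
  | e, [] => (e, [])
  | e, x :: xs => if x = e + 1 then uniqBConsume x xs else (e, x :: xs)

-- termination fact for uniqBGroup (cited by its decreasing_by)
theorem uniqBConsume_len : ∀ (e : Nat) (l : List Nat), (uniqBConsume e l).2.length ≤ l.length := by
  intro e l
  induction l generalizing e with
  | nil => simp [uniqBConsume]
  | cons x xs ih =>
    simp only [uniqBConsume]
    split
    · exact le_trans (ih x) (by simp)
    · simp

-- B's outer `while k < len(bits)` loop: one maximal run per iteration
def uniqBGroup : List Nat → List Char
  | [] => []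
  | s :: rest =>
    let p := uniqBConsume s rest
    (if s + 2 ≤ p.1 then [Char.ofNat (65 + s), '-', Char.ofNat (65 + p.1)]
     else (List.range' s (p.1 + 1 - s)).map (fun i => Char.ofNat (65 + i)))
    ++ uniqBGroup p.2
termination_by l => l.length
decreasing_by exact Nat.lt_succ_of_le (uniqBConsume_len s rest)

def uniqmask_to_str_alt (uniqmask : Int) : String :=
  if uniqmask = 0 then "-"
  else if PySem.Int.band uniqmask UNIQ_MASK_IP ≠ 0 then "[IP]"
  else if PySem.Int.band uniqmask UNIQ_MASK_RACK ≠ 0 then "[RACK]"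
  else
    let bits : List Nat := (List.range 26).filter (fun i => PySem.Int.band (uniqmask >>> i) 1 != 0)
    String.ofList (uniqBGroup bits)

-- ===== PRECONDITION & SPEC =====
def Spec_uniqmask_to_str (uniqmask : Int) (out : String) : Prop := out = uniqmask_to_str_alt uniqmask
instance (uniqmask : Int) (out : String) : Decidable (Spec_uniqmask_to_str uniqmask out) := by unfold Spec_uniqmask_to_str; infer_instance

-- ===== CLAIM (what is proved, stated in full; the proofs are below) =====
def Claim_equal_uniqmask_to_str : Prop := ∀ (uniqmask : Int), Dom_uniqmask_to_str uniqmask → Spec_uniqmask_to_str uniqmask (uniqmask_to_str uniqmask)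

-- ===== LEMMAS AND PROOFS =====

-- A's loop step with the two bit tests abstracted to a bit predicate t
def uniqStepT (t : Nat → Bool) (st : List Char × Int) (i : Nat) : List Char × Int :=
  if t i = true then
    if st.2 = 0 then
      let rstr := st.1 ++ [Char.ofNat (65 + i)]
      if i < 24 ∧ t i = true ∧ t (i + 1) = true ∧ t (i + 2) = true then (rstr, 1) else (rstr, 0)
    else st
  else
    if st.2 = 1 then (st.1 ++ ['-', Char.ofNat (65 + (i - 1))], 0) else st

-- A's post-loop tail
def uniqFin (st : List Char × Int) : List Char :=
  if st.2 ≠ 0 then st.1 ++ ['-', Char.ofNat (65 + 25)] else st.1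

-- length of the maximal all-true run of t starting at p, within k positions
def uniqRun (t : Nat → Bool) : Nat → Nat → Nat
  | _, 0 => 0
  | p, k + 1 => if t p then uniqRun t (p + 1) k + 1 else 0

theorem uniqRun_le (t : Nat → Bool) : ∀ (k p : Nat), uniqRun t p k ≤ k := by
  intro k
  induction k with
  | zero => intro p; simp [uniqRun]
  | succ k ih => intro p; simp only [uniqRun]; split <;> simp [Nat.succ_le_succ (ih (p+1))]

theorem uniqRun_true (t : Nat → Bool) : ∀ (k p j : Nat), j < uniqRun t p k → t (p + j) = true := by
  intro k
  induction k with
  | zero => intro p j h; simp [uniqRun] at h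
  | succ k ih =>
    intro p j h
    simp only [uniqRun] at h
    by_cases hp : t p = true
    · rw [hp, if_pos rfl] at h
      cases j with
      | zero => simpa using hp
      | succ j =>
        have := ih (p + 1) j (by omega)
        have e : p + 1 + j = p + (j + 1) := by omega
        rwa [e] at this
    · simp [hp] at h

theorem uniqRun_false (t : Nat → Bool) :
    ∀ (k p : Nat), uniqRun t p k < k → t (p + uniqRun t p k) = false := by
  intro k
  induction k with
  | zero => intro p h; omega
  | succ k ih =>
    intro p h
    simp only [uniqRun] at h ⊢
    by_cases hp : t p = true
    · rw [hp, if_pos rfl] at h ⊢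
      have := ih (p + 1) (by omega)
      have e : p + 1 + uniqRun t (p + 1) k = p + (uniqRun t (p + 1) k + 1) := by omega
      rwa [e] at this
    · simp only [Bool.not_eq_true] at hp
      simpa [hp]

theorem uniqRun_ge_two (t : Nat → Bool) (k p : Nat) (hk : 2 ≤ k)
    (h0 : t p = true) (h1 : t (p + 1) = true) : 2 ≤ uniqRun t p k := by
  obtain ⟨k', rfl⟩ : ∃ k', k = k' + 2 := ⟨k - 2, by omega⟩
  simp only [uniqRun, h0, h1, if_pos rfl, if_true]
  omega

-- state-1 iterations over an all-true block change nothing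
theorem uniqSkip (t : Nat → Bool) :
    ∀ (c p : Nat) (s : List Char), (∀ j < c, t (p + j) = true) →
      List.foldl (uniqStepT t) (s, 1) (List.range' p c) = (s, 1) := by
  intro c
  induction c with
  | zero => intro p s _; simp
  | succ c ih =>
    intro p s h
    rw [List.range'_succ, List.foldl_cons]
    have hp : t p = true := by simpa using h 0 (by omega)
    have : uniqStepT t (s, 1) p = (s, 1) := by simp [uniqStepT, hp]
    rw [this]
    exact ih (p + 1) s (fun j hj => by
      have := h (j + 1) (by omega)
      have e : p + (j + 1) = p + 1 + j := by omega
      rwa [e] at this)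

-- B's run walk consumes exactly a block of consecutive indices
theorem uniqConsume_run :
    ∀ (c s : Nat) (L : List Nat), (∀ x ∈ L.head?, x ≠ s + c + 1) →
      uniqBConsume s (List.range' (s + 1) c ++ L) = (s + c, L) := by
  intro c
  induction c with
  | zero =>
    intro s L hL
    cases L with
    | nil => simp [uniqBConsume]
    | cons x xs =>
      have : x ≠ s + 1 := by simpa using hL x
      simp [uniqBConsume, this]
  | succ c ih =>
    intro s L hL
    rw [List.range'_succ, List.cons_append]
    simp only [uniqBConsume]
    have h2 := ih (s + 1) L (fun x hx => by have := hL x hx; omega)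
    rw [show s + 1 + c = s + (c + 1) by omega] at h2
    exact h2

-- B's grouping of (head run of length c+1) ++ remainder
theorem uniqGroup_cons (s c : Nat) (L : List Nat) (hL : ∀ x ∈ L.head?, x ≠ s + c + 1) :
    uniqBGroup (s :: (List.range' (s + 1) c ++ L)) =
      (if s + 2 ≤ s + c then [Char.ofNat (65 + s), '-', Char.ofNat (65 + (s + c))]
       else (List.range' s (c + 1)).map (fun i => Char.ofNat (65 + i))) ++ uniqBGroup L := by
  rw [uniqBGroup]
  rw [uniqConsume_run c s L hL]
  have e : s + c + 1 - s = c + 1 := by omega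
  simp [e]

theorem uniqHead_ne (F : List Nat) (v : Nat) (hv : v ∉ F) : ∀ x ∈ F.head?, x ≠ v := by
  intro x hx
  have : x ∈ F := by
    cases F with
    | nil => simp at hx
    | cons a l => simp at hx; simp [hx]
  exact fun h => hv (h ▸ this)

-- the main loop equivalence, over an abstract bit predicate
theorem uniqMain :
    ∀ (k : Nat), ∀ (pos : Nat) (t : Nat → Bool) (acc : List Char), pos + k = 26 →
      uniqFin (List.foldl (uniqStepT t) (acc, 0) (List.range' pos k)) =
        acc ++ uniqBGroup ((List.range' pos k).filter t) := by
  intro k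
  induction k using Nat.strong_induction_on with
  | _ k ih =>
  intro pos t acc hk
  match k with
  | 0 => simp [uniqFin, uniqBGroup]
  | k' + 1 =>
    rw [List.range'_succ, List.foldl_cons, List.filter_cons]
    by_cases hb : t pos = true
    case neg =>
      -- bit pos clear: nothing happens
      have hstep : uniqStepT t (acc, 0) pos = (acc, 0) := by simp [uniqStepT, hb]
      rw [hstep, if_neg hb]
      exact ih k' (by omega) (pos + 1) t acc (by omega)
    case pos =>
      rw [if_pos hb]
      by_cases hc : pos < 24 ∧ t (pos + 1) = true ∧ t (pos + 2) = true
      · -- compress: run of length ≥ 3 starts at pos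
        have hstep : uniqStepT t (acc, 0) pos = (acc ++ [Char.ofNat (65 + pos)], 1) := by
          simp [uniqStepT, hb, hc.1, hc.2.1, hc.2.2]
        rw [hstep]
        obtain ⟨c, hcdef⟩ : ∃ c, uniqRun t (pos + 1) k' = c := ⟨_, rfl⟩
        have hcle : c ≤ k' := hcdef ▸ uniqRun_le t k' (pos + 1)
        have hk2 : 2 ≤ k' := by omega
        have hc2 : 2 ≤ c := hcdef ▸ uniqRun_ge_two t k' (pos + 1) hk2 hc.2.1 hc.2.2
        have htr : ∀ j < c, t (pos + 1 + j) = true := fun j hj =>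
          uniqRun_true t k' (pos + 1) j (hcdef ▸ hj)
        -- split the range after the run
        have hsplit : List.range' (pos + 1) k' =
            List.range' (pos + 1) c ++ List.range' (pos + 1 + c) (k' - c) := by
          have h := List.range'_append (s := pos + 1) (m := c) (n := k' - c) (step := 1)
          rw [show pos + 1 + 1 * c = pos + 1 + c by omega, show c + (k' - c) = k' by omega] at h
          exact h.symm
        rw [hsplit, List.foldl_append, uniqSkip t c (pos + 1) _ htr]
        -- B side: the run filters to itself
        have hfilt_run : (List.range' (pos + 1) c).filter t = List.range' (pos + 1) c := by
          rw [List.filter_eq_self]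
          intro a ha
          rw [List.mem_range'] at ha
          obtain ⟨j, hj, rfl⟩ := ha
          simpa using htr j (by omega)
        rw [List.filter_append, hfilt_run]
        rcases Nat.eq_or_lt_of_le hcle with hck | hck
        · -- run reaches bit 25
          have h25 : pos + c = 25 := by omega
          rw [show k' - c = 0 by omega, List.range'_zero, List.filter_nil, List.foldl_nil]
          rw [uniqGroup_cons pos c [] (by simp), if_pos (by omega)]
          simp only [uniqBGroup, List.append_nil]
          simp [uniqFin, h25]
        · -- run is ended by a clear bit at pos+1+c
          have hf : t (pos + 1 + c) = false := by
            have h := uniqRun_false t k' (pos + 1) (by rw [hcdef]; omega)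
            rw [hcdef] at h
            exact h
          have hsplit2 : List.range' (pos + 1 + c) (k' - c) =
              (pos + 1 + c) :: List.range' (pos + c + 2) (k' - c - 1) := by
            obtain ⟨r, hr⟩ : ∃ r, k' - c = r + 1 := ⟨k' - c - 1, by omega⟩
            rw [hr, List.range'_succ, show pos + 1 + c + 1 = pos + c + 2 by omega]
            simp
          rw [hsplit2, List.foldl_cons]
          have hstep2 : uniqStepT t (acc ++ [Char.ofNat (65 + pos)], 1) (pos + 1 + c) =
              (acc ++ [Char.ofNat (65 + pos)] ++ ['-', Char.ofNat (65 + (pos + c))], 0) := by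
            have hsub : pos + 1 + c - 1 = pos + c := by omega
            simp [uniqStepT, hf, hsub]
          rw [hstep2, ih (k' - c - 1) (by omega) (pos + c + 2) t _ (by omega)]
          rw [List.filter_cons, if_neg (by simp [hf])]
          set F := (List.range' (pos + c + 2) (k' - c - 1)).filter t with hF
          have hFhead : ∀ x ∈ F.head?, x ≠ pos + c + 1 := by
            apply uniqHead_ne
            intro hmem
            rw [hF, List.mem_filter, List.mem_range'] at hmem
            obtain ⟨⟨j, hj1, hj2⟩, _⟩ := hmem
            omega
          rw [uniqGroup_cons pos c F hFhead, if_pos (by omega)]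
          simp
      · -- no compress: run of length 1 or 2 starts at pos
        have hstep : uniqStepT t (acc, 0) pos = (acc ++ [Char.ofNat (65 + pos)], 0) := by
          simp [uniqStepT, hb, hc]
        rw [hstep, ih k' (by omega) (pos + 1) t _ (by omega)]
        by_cases hb1 : 1 ≤ k' ∧ t (pos + 1) = true
        · -- run of length exactly 2
          have hsplit : List.range' (pos + 1) k' =
              (pos + 1) :: List.range' (pos + 2) (k' - 1) := by
            obtain ⟨r, hr⟩ : ∃ r, k' = r + 1 := ⟨k' - 1, by omega⟩
            rw [hr, List.range'_succ, show pos + 1 + 1 = pos + 2 by omega]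
            simp
          set F2 := (List.range' (pos + 2) (k' - 1)).filter t with hF2
          have hfilt : (List.range' (pos + 1) k').filter t = (pos + 1) :: F2 := by
            rw [hsplit, List.filter_cons, if_pos hb1.2]
          have hF2head : ∀ x ∈ F2.head?, x ≠ pos + 2 := by
            apply uniqHead_ne
            intro hmem
            rw [hF2, List.mem_filter, List.mem_range'] at hmem
            obtain ⟨⟨j, hj, hje⟩, hmem2⟩ := hmem
            exact hc ⟨by omega, hb1.2, hmem2⟩
          rw [hfilt]
          -- B groups pos,pos+1 as a length-2 run: two letters
          have g1 : uniqBGroup (pos :: (pos + 1) :: F2) =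
              [Char.ofNat (65 + pos), Char.ofNat (65 + (pos + 1))] ++ uniqBGroup F2 := by
            have h := uniqGroup_cons pos 1 F2 (fun x hx => by
              have := hF2head x hx; omega)
            rw [List.range'_one, List.singleton_append] at h
            rw [h, if_neg (by omega)]
            simp [List.range']
          have g2 : uniqBGroup ((pos + 1) :: F2) =
              [Char.ofNat (65 + (pos + 1))] ++ uniqBGroup F2 := by
            have h := uniqGroup_cons (pos + 1) 0 F2 (fun x hx => by
              have := hF2head x hx; omega)
            rw [List.range'_zero, List.nil_append] at h
            rw [h, if_neg (by omega)]
            simp [List.range']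
          rw [g1, g2]
          simp
        · -- run of length 1: bit pos+1 clear (or range exhausted)
          set F := (List.range' (pos + 1) k').filter t with hF
          have hFhead : ∀ x ∈ F.head?, x ≠ pos + 1 := by
            apply uniqHead_ne
            intro hmem
            rw [hF, List.mem_filter, List.mem_range'] at hmem
            obtain ⟨⟨j, hj, hje⟩, hmem2⟩ := hmem
            exact hb1 ⟨by omega, hmem2⟩
          have g1 : uniqBGroup (pos :: F) = [Char.ofNat (65 + pos)] ++ uniqBGroup F := by
            have h := uniqGroup_cons pos 0 F (fun x hx => by have := hFhead x hx; omega)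
            rw [List.range'_zero, List.nil_append] at h
            rw [h, if_neg (by omega)]
            simp [List.range']
          rw [g1]
          simp

-- A's bit test `uniqmask & (1<<i)` reads Int.testBit
theorem uniqBand_pow (u : Int) (i : Nat) :
    (PySem.Int.band u (((1 <<< i : Nat) : Int)) ≠ 0) ↔ u.testBit i = true := by
  have hpow : (1 <<< i : Nat) = 2 ^ i := by simp [Nat.shiftLeft_eq]
  rw [hpow]
  have hp : 0 < 2 ^ i := by positivity
  cases u with
  | ofNat m =>
    have hb : PySem.Int.band (Int.ofNat m) (((2 ^ i : Nat) : Int)) = Int.ofNat (m &&& 2 ^ i) := by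
      simp [PySem.Int.band]
      rfl
    rw [hb, Nat.and_two_pow]
    cases h : m.testBit i <;> simp [Int.testBit, h]
  | negSucc m =>
    have hb : PySem.Int.band (Int.negSucc m) (((2 ^ i : Nat) : Int)) =
        Int.ofNat (2 ^ i - (2 ^ i &&& m)) := by
      simp [PySem.Int.band]
      rfl
    rw [hb, Nat.two_pow_and]
    cases h : m.testBit i <;> simp [Int.testBit, h]

-- `v & 7 == 7` reads the three low bits
theorem uniqBand7 (v : Int) :
    (PySem.Int.band v 7 = 7) ↔ (v.testBit 0 = true ∧ v.testBit 1 = true ∧ v.testBit 2 = true) := by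
  have e0 : ∀ m : Nat, m.testBit 0 = decide (m % 2 = 1) := fun m => by
    rw [Nat.testBit_eq_decide_div_mod_eq]; norm_num
  have e1 : ∀ m : Nat, m.testBit 1 = decide (m / 2 % 2 = 1) := fun m => by
    rw [Nat.testBit_eq_decide_div_mod_eq]
  have e2 : ∀ m : Nat, m.testBit 2 = decide (m / 4 % 2 = 1) := fun m => by
    rw [Nat.testBit_eq_decide_div_mod_eq]
  cases v with
  | ofNat m =>
    have hb : PySem.Int.band (Int.ofNat m) 7 = ((m &&& 7 : Nat) : Int) := by
      simp [PySem.Int.band]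
    have h8 : m &&& 7 = m % 8 := by
      have h := Nat.and_two_pow_sub_one_eq_mod m 3
      norm_num at h
      exact h
    rw [hb, h8]
    simp only [Int.testBit, e0, e1, e2, decide_eq_true_eq]
    constructor
    · intro h
      have h' : m % 8 = 7 := by exact_mod_cast h
      refine ⟨by omega, by omega, by omega⟩
    · rintro ⟨a, b, c⟩
      have h' : m % 8 = 7 := by omega
      exact_mod_cast congrArg (fun n : Nat => (n : Int)) h'
  | negSucc m =>
    have hb : PySem.Int.band (Int.negSucc m) 7 = ((7 - (7 &&& m) : Nat) : Int) := by
      simp [PySem.Int.band]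
    have h8 : 7 &&& m = m % 8 := by
      rw [Nat.and_comm]
      have h := Nat.and_two_pow_sub_one_eq_mod m 3
      norm_num at h
      exact h
    rw [hb, h8]
    simp only [Int.testBit, e0, e1, e2, Bool.not_eq_true', decide_eq_false_iff_not]
    constructor
    · intro h
      have h' : 7 - m % 8 = 7 := by exact_mod_cast h
      refine ⟨by omega, by omega, by omega⟩
    · rintro ⟨a, b, c⟩
      have h' : 7 - m % 8 = 7 := by omega
      exact_mod_cast congrArg (fun n : Nat => (n : Int)) h'

theorem uniqShift_testBit (u : Int) (i j : Nat) : (u >>> i).testBit j = u.testBit (i + j) := by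
  cases u with
  | ofNat m =>
    show (Int.ofNat (m >>> i)).testBit j = _
    simp [Int.testBit, Nat.testBit_shiftRight]
  | negSucc m =>
    show (Int.negSucc (m >>> i)).testBit j = _
    simp [Int.testBit, Nat.testBit_shiftRight]

-- A's step equals the abstract step at t = u.testBit
theorem uniqStep_eq (u : Int) (st : List Char × Int) (i : Nat) :
    uniqAStep u st i = uniqStepT (fun j => u.testBit j) st i := by
  have h1 : (PySem.Int.band u (((1 <<< i : Nat) : Int)) ≠ 0) = (u.testBit i = true) :=
    propext (uniqBand_pow u i)
  have h2 : (i < 24 ∧ PySem.Int.band (u >>> i) 7 = 7) =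
      (i < 24 ∧ u.testBit i = true ∧ u.testBit (i + 1) = true ∧ u.testBit (i + 2) = true) := by
    apply propext
    constructor
    · rintro ⟨hi, hband⟩
      have h := (uniqBand7 (u >>> i)).mp hband
      rw [uniqShift_testBit, uniqShift_testBit, uniqShift_testBit] at h
      exact ⟨hi, by simpa using h⟩
    · rintro ⟨hi, ht0, ht1, ht2⟩
      refine ⟨hi, (uniqBand7 (u >>> i)).mpr ?_⟩
      rw [uniqShift_testBit, uniqShift_testBit, uniqShift_testBit]
      simp only [Nat.add_zero]
      exact ⟨ht0, ht1, ht2⟩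
  simp only [uniqAStep, uniqStepT, h1, h2]

-- B's filter test equals t = u.testBit
theorem uniqFilt_eq (u : Int) (i : Nat) :
    (PySem.Int.band (u >>> i) 1 != 0) = u.testBit i := by
  have h1 : (PySem.Int.band (u >>> i) 1 ≠ 0) ↔ (u >>> i).testBit 0 = true :=
    uniqBand_pow (u >>> i) 0
  rw [uniqShift_testBit, Nat.add_zero] at h1
  cases h : u.testBit i
  · simp only [bne_eq_false_iff_eq]
    by_contra hne
    have := h1.mp (by simpa using hne)
    rw [this] at h
    exact Bool.false_ne_true h.symm
  · simp only [bne_iff_ne, ne_eq]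
    exact fun hz => by
      have : ¬ (u.testBit i = true) := fun ht => by
        exact absurd (h1.mpr ht) (by simpa using hz)
      exact this h

-- the whole non-early-return branch
theorem uniqLoops_eq (u : Int) :
    uniqFin ((List.range 26).foldl (uniqAStep u) ([], 0)) =
      uniqBGroup ((List.range 26).filter (fun i : Nat => PySem.Int.band (u >>> i) 1 != 0)) := by
  have hstep : uniqAStep u = uniqStepT (fun j => u.testBit j) :=
    funext fun st => funext fun i => uniqStep_eq u st i
  have hfilt : (List.range 26).filter (fun i : Nat => PySem.Int.band (u >>> i) 1 != 0) =
      (List.range 26).filter (fun j => u.testBit j) := by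
    apply List.filter_congr
    intro x _
    exact uniqFilt_eq u x
  rw [hstep, hfilt, List.range_eq_range']
  exact uniqMain 26 0 (fun j => u.testBit j) [] rfl

-- ===== VERDICT (by name: the statement is the Claim_ definition above) =====
theorem uniqmask_to_str_spec : Claim_equal_uniqmask_to_str := by
  intro u _
  unfold Spec_uniqmask_to_str uniqmask_to_str uniqmask_to_str_alt
  split
  · rfl
  split
  · rfl
  split
  · rfl
  have := uniqLoops_eq u
  unfold uniqFin at this
  split at this
  · rw [if_pos (by assumption)]
    exact congrArg String.ofList this
  · rw [if_neg (by assumption)]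
    exact congrArg String.ofList this
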